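-- pv_equiv track=rewrite | github.com/hmztj/Codility-Solutions | DistincValue.py | solution
-- ===== SOURCE A (Python) =====
-- def solution(A):
--     A.sort()
--     if(len(A )== 1):
--         return A[0]
--     N = len(A)
--     for i in range(0, N-1, 2):
--         if(A[i]  != A[i+1]):
--             return A[i]
--     return A[N-1]
-- ===== SOURCE B (Python) =====
-- def solution(A):
--     # Sort in place (same observable mutation as the original), then walk the
--     # sorted list one *run of equal values* at a time, keeping a running
--     # cumulative count; the answer is the first value at which the cumulative
--     # count becomes odd, or the largest element if no prefix count is odd.
--     A.sort()
--     cum = 0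
--     i = 0
--     n = len(A)
--     while i < n:
--         j = i + 1
--         while j < n and A[j] == A[i]:
--             j += 1
--         cum += j - i
--         if cum % 2 == 1:
--             return A[i]
--         i = j
--     return A[-1]
-- ===== Notes on version B (the rewrite author's own statement) =====
-- stated objective: alternative
-- what changed: Replaces the even-index adjacent-pair scan with a single run-length traversal of the sorted list that tracks the parity of the cumulative count and returns the first value whose cumulative count is odd.
import Mathlib
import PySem

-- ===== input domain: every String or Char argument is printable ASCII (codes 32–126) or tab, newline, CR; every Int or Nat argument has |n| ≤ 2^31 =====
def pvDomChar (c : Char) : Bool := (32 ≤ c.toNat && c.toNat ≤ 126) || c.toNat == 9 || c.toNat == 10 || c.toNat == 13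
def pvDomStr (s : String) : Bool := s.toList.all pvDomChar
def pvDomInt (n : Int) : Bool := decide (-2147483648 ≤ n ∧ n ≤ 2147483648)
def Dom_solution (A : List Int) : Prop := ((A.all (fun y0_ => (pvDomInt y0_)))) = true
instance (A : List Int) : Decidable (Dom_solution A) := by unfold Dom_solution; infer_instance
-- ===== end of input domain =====

-- B walks the sorted list one run of equal values at a time, tracking the parity of the
-- cumulative count, instead of A's even-index adjacent-pair scan; equivalence is about the
-- RETURN value only (both Pythons sort A in place, the same mutation).

-- ===== PORT A =====
-- the for-loop over range(0, N-1, 2) with early return; indices are always in range here,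
-- so A[i] / A[i+1] are ported with pyGetD (exact under Pre_solution)
def solutionLoopA (L : List Int) : List Int → Option Int
  | [] => none
  | i :: rest =>
    if PySem.List.pyGetD L i 0 ≠ PySem.List.pyGetD L (i + 1) 0 then
      some (PySem.List.pyGetD L i 0)
    else solutionLoopA L rest

def solution (A : List Int) : Int :=
  let L := PySem.List.sorted A (fun x => x) false
  if L.length == 1 then PySem.List.pyGetD L 0 0
  else
    let N : Int := L.length
    match solutionLoopA L (PySem.List.pyRange 0 (N - 1) 2) with
    | some v => v
    | none => PySem.List.pyGetD L (N - 1) 0   -- A[N-1]: IndexError on [] is excluded by Pre_solution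

-- ===== PORT B =====
-- the outer while-loop of Source B: each step consumes one maximal run of equal adjacent values
-- (the inner 'while j < n and A[j] == A[i]' = takeWhile/dropWhile) and adds its length to cum
def solutionLoopB (cum : Int) : List Int → Option Int
  | [] => none
  | v :: rest =>
    let run := rest.takeWhile (fun x => x == v)
    let rest' := rest.dropWhile (fun x => x == v)
    let cum' := cum + 1 + run.length
    if cum' % 2 == 1 then some v else solutionLoopB cum' rest'
termination_by l => l.length
decreasing_by
  simp only [List.length_cons]
  exact Nat.lt_succ_of_le (List.length_dropWhile_le _ _)

def solution_alt (A : List Int) : Int :=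
  let L := PySem.List.sorted A (fun x => x) false
  match solutionLoopB 0 L with
  | some v => v
  | none => PySem.List.pyGetD L (-1) 0   -- A[-1]: IndexError on [] is excluded by Pre_solution

-- ===== PRECONDITION & SPEC =====
-- A raises IndexError on the empty list (A[-1] / A[N-1] after the loop); B raises there too.
def Pre_solution (A : List Int) : Prop := A ≠ []
instance (A : List Int) : Decidable (Pre_solution A) := by unfold Pre_solution; infer_instance
def pvWitness_solution : List Int := [2, 1, 2]

def Spec_solution (A : List Int) (out : Int) : Prop := out = solution_alt A
instance (A : List Int) (out : Int) : Decidable (Spec_solution A out) := by unfold Spec_solution; infer_instance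

-- ===== CLAIM (what is proved, stated in full; the proofs are below) =====
def Claim_equal_solution : Prop := ∀ (A : List Int), Dom_solution A → Pre_solution A → Spec_solution A (solution A)

-- ===== LEMMAS AND PROOFS =====

-- the common reference description of A's pair scan: structural recursion two elements at a time
def pairRes : List Int → Option Int
  | a :: b :: t => if a ≠ b then some a else pairRes t
  | _ => none

lemma pyRange_two_nil (a b : Int) (h : b ≤ a) : PySem.List.pyRange a b 2 = [] := by
  rw [PySem.List.pyRange_of_pos a b (by norm_num)]
  have : ¬ a < b := by omega
  simp [this]

lemma pyRange_two_cons (a b : Int) (h : a < b) :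
    PySem.List.pyRange a b 2 = a :: PySem.List.pyRange (a + 2) b 2 := by
  rw [PySem.List.pyRange_of_pos a b (by norm_num),
      PySem.List.pyRange_of_pos (a + 2) b (by norm_num)]
  have hn : (if a < b then ((b - a + 2 - 1) / 2).toNat else 0)
      = (if a + 2 < b then ((b - (a + 2) + 2 - 1) / 2).toNat else 0) + 1 := by
    split_ifs <;> omega
  rw [hn, List.range_succ_eq_map]
  simp only [List.map_cons, List.map_map, Nat.cast_zero, mul_zero, add_zero]
  refine congrArg (a :: ·) (List.map_congr_left ?_)
  intro k _
  simp only [Function.comp]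
  push_cast
  ring

-- A's index loop over range(k, N-1, 2) computes pairRes of the suffix from k
lemma loopA_eq_pairRes (L : List Int) :
    ∀ k : Nat, solutionLoopA L (PySem.List.pyRange k ((L.length : Int) - 1) 2) = pairRes (L.drop k) := by
  have H : ∀ n k, L.length - k ≤ n →
      solutionLoopA L (PySem.List.pyRange k ((L.length : Int) - 1) 2) = pairRes (L.drop k) := by
    intro n
    induction n with
    | zero =>
      intro k hk
      have hk' : L.length ≤ k := by omega
      rw [pyRange_two_nil _ _ (by omega : ((L.length : Int) - 1) ≤ (k : Int))]
      rw [List.drop_eq_nil_of_le hk']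
      rfl
    | succ n ih =>
      intro k hk
      by_cases hlt : k + 1 < L.length
      · have hcons : PySem.List.pyRange k ((L.length : Int) - 1) 2
            = (k : Int) :: PySem.List.pyRange ((k : Int) + 2) ((L.length : Int) - 1) 2 := by
          apply pyRange_two_cons
          omega
        rw [hcons]
        have hk0 : k < L.length := by omega
        have hdrop : L.drop k = L[k] :: L[k + 1] :: L.drop (k + 2) := by
          rw [List.drop_eq_getElem_cons hk0]
          congr 1
          rw [List.drop_eq_getElem_cons hlt]
        have hg0 : PySem.List.pyGetD L (k : Int) 0 = L[k] :=
          PySem.List.pyGetD_ofNat L k 0 hk0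
        have hg1 : PySem.List.pyGetD L ((k : Int) + 1) 0 = L[k + 1] := by
          have : ((k : Int) + 1) = ((k + 1 : Nat) : Int) := by push_cast; ring
          rw [this]
          exact PySem.List.pyGetD_ofNat L (k+1) 0 hlt
        show (if PySem.List.pyGetD L (k : Int) 0 ≠ PySem.List.pyGetD L ((k : Int) + 1) 0 then
            some (PySem.List.pyGetD L (k : Int) 0)
          else solutionLoopA L (PySem.List.pyRange ((k : Int) + 2) ((L.length : Int) - 1) 2)) = _
        rw [hg0, hg1, hdrop]
        by_cases hne : L[k] ≠ L[k + 1]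
        · simp [pairRes, hne]
        · rw [if_neg hne]
          have h2 : ((k : Int) + 2) = ((k + 2 : Nat) : Int) := by push_cast; ring
          rw [h2, ih (k + 2) (by omega)]
          simp [pairRes, not_not.mp hne]
      · -- suffix of length ≤ 1: empty range, pairRes none
        rw [pyRange_two_nil _ _ (by omega : ((L.length : Int) - 1) ≤ (k : Int))]
        have hlen : (L.drop k).length ≤ 1 := by
          rw [List.length_drop]; omega
        show none = pairRes (L.drop k)
        match hd : L.drop k with
        | [] => rfl
        | [a] => rfl
        | a :: b :: t => rw [hd] at hlen; simp at hlen
  intro k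
  exact H (L.length - k) k le_rfl

-- pairRes on a run of r copies of v followed by rest' whose head differs from v
lemma pairRes_replicate (r : Nat) (v : Int) (rest' : List Int)
    (hhd : ∀ x ∈ rest'.head?, x ≠ v) :
    pairRes (List.replicate r v ++ rest')
      = if r % 2 = 1 then (if rest' = [] then none else some v) else pairRes rest' := by
  induction r using Nat.strong_induction_on with
  | _ r ih =>
    match r with
    | 0 => simp
    | 1 =>
      simp only [List.replicate_one, List.cons_append, List.nil_append]
      match rest' with
      | [] => rfl
      | b :: t =>
        have hb : b ≠ v := hhd b (by simp)
        simp [pairRes, hb.symm]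
    | (r + 2) =>
      have hrw : List.replicate (r + 2) v ++ rest' = v :: v :: (List.replicate r v ++ rest') := by
        simp [List.replicate_succ]
      rw [hrw]
      have hstep : pairRes (v :: v :: (List.replicate r v ++ rest')) = pairRes (List.replicate r v ++ rest') := by
        simp [pairRes]
      rw [hstep, ih r (by omega)]
      have hmod : (r + 2) % 2 = r % 2 := by omega
      rw [hmod]

lemma getLast_replicate_append (r : Nat) (v : Int) (rest' : List Int)
    (h : List.replicate (r + 1) v ++ rest' ≠ []) :
    (List.replicate (r + 1) v ++ rest').getLast h = rest'.getLastD v := by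
  match rest' with
  | [] =>
    simp only [List.append_nil]
    exact List.eq_of_mem_replicate (List.getLast_mem _)
  | b :: t =>
    rw [List.getLast_append_of_ne_nil h (by simp)]
    simp [List.getLastD_eq_getLast?, List.getLast?_eq_some_getLast]

lemma solutionLoopB_nil (cum : Int) : solutionLoopB cum [] = none := by
  rw [solutionLoopB]

lemma optMatch (o : Option Int) (d : Int) :
    (match o with | some v => v | none => d) = o.getD d := by cases o <;> rfl

-- main B-side lemma: the run-parity loop agrees with the pair scan after the last-element fallback
lemma loopB_aux : ∀ (n : Nat) (L : List Int), L.length ≤ n → ∀ hne : L ≠ [], ∀ cum : Int, cum % 2 = 0 →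
    (solutionLoopB cum L).getD (L.getLast hne) = (pairRes L).getD (L.getLast hne) := by
  intro n
  induction n with
  | zero => intro L hL hne; simp at hL; exact absurd hL hne
  | succ n ih =>
    intro L hL hne cum hcum
    match L with
    | v :: rest =>
      set run := rest.takeWhile (fun x => x == v) with hrun
      set rest' := rest.dropWhile (fun x => x == v) with hrest'
      have hsplit : rest = run ++ rest' := (List.takeWhile_append_dropWhile).symm
      have hrep : run = List.replicate run.length v := by
        apply List.eq_replicate_of_mem
        intro x hx
        have := List.mem_takeWhile_imp (hrun ▸ hx)
        simpa using this
      have hL' : v :: rest = List.replicate (run.length + 1) v ++ rest' := by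
        rw [List.replicate_succ, List.cons_append, ← hrep, ← hsplit]
      have hhd : ∀ x ∈ rest'.head?, x ≠ v := by
        intro x hx
        have hnot := List.head?_dropWhile_not (fun z => z == v) rest
        rw [← hrest'] at hnot
        cases hh : rest'.head? with
        | none => rw [hh] at hx; simp at hx
        | some y =>
          rw [hh] at hx hnot
          simp at hx hnot
          subst hx
          exact hnot
      have hBstep : solutionLoopB cum (v :: rest)
          = (if (cum + 1 + run.length) % 2 == 1 then some v else solutionLoopB (cum + 1 + run.length) rest') := by
        rw [solutionLoopB]
      have hpair : pairRes (v :: rest)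
          = if (run.length + 1) % 2 = 1 then (if rest' = [] then none else some v) else pairRes rest' := by
        conv_lhs => rw [hL']
        exact pairRes_replicate (run.length + 1) v rest' hhd
      have hner : List.replicate (run.length + 1) v ++ rest' ≠ [] := by simp
      have hlast : (v :: rest).getLast hne = rest'.getLastD v :=
        (List.getLast_congr hne hner hL').trans (getLast_replicate_append run.length v rest' hner)
      by_cases hodd : (run.length + 1) % 2 = 1
      · -- the cumulative count becomes odd at this run: both sides return v
        have hco : ((cum + 1 + (run.length : Int)) % 2 == 1) = true := by
          simp only [beq_iff_eq]; omega
        rw [hBstep, hco, if_pos rfl, hpair, if_pos hodd]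
        by_cases hr : rest' = []
        · simp [hr, hlast]
        · simp [hr]
      · -- even run: both sides defer to rest'
        have hco : ((cum + 1 + (run.length : Int)) % 2 == 1) = false := by
          rw [beq_eq_false_iff_ne]; omega
        rw [hBstep, hco, if_neg (by simp), hpair, if_neg hodd]
        match hr : rest' with
        | [] => rw [solutionLoopB_nil]; rfl
        | b :: t =>
          have hlen : (b :: t).length ≤ n := by
            have h1 : (b :: t).length ≤ rest.length := by
              rw [hrest']; exact List.length_dropWhile_le _ _
            simp only [List.length_cons] at hL h1 ⊢
            omega
          have hcum' : (cum + 1 + (run.length : Int)) % 2 = 0 := by omega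
          have hIH := ih (b :: t) hlen (by simp) (cum + 1 + run.length) hcum'
          have hlast' : (v :: rest).getLast hne = (b :: t).getLast (by simp) := by
            rw [hlast]
            simp [List.getLastD_eq_getLast?, List.getLast?_eq_some_getLast]
          rw [hlast', hIH]

lemma loopB_eq_pairRes (L : List Int) (hne : L ≠ []) (cum : Int) (hcum : cum % 2 = 0) :
    (solutionLoopB cum L).getD (L.getLast hne) = (pairRes L).getD (L.getLast hne) :=
  loopB_aux L.length L le_rfl hne cum hcum

-- ===== VERDICT (by name: the statement is the Claim_ definition above) =====
theorem solution_spec : Claim_equal_solution := by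
  intro A _ hpre
  unfold Spec_solution solution solution_alt
  set L := PySem.List.sorted A (fun x => x) false with hLdef
  have hperm : L.Perm A := PySem.List.sorted_perm A (fun x => x) false
  have hLne : L ≠ [] := by
    intro h
    rw [h] at hperm
    exact hpre hperm.symm.eq_nil
  simp only []
  by_cases h1 : L.length = 1
  · obtain ⟨v, hv⟩ : ∃ v, L = [v] := by
      match L, h1 with
      | [v], _ => exact ⟨v, rfl⟩
    rw [hv]
    rw [solutionLoopB]
    simp [PySem.List.pyGetD_zero_cons]
  · have hif : (L.length == 1) = false := by simpa using h1
    rw [hif]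
    simp only [Bool.false_eq_true, if_false]
    have hA : solutionLoopA L (PySem.List.pyRange 0 ((L.length : Int) - 1) 2) = pairRes L := by
      have := loopA_eq_pairRes L 0
      simpa using this
    rw [hA, optMatch, optMatch]
    have hlen0 : 0 < L.length := List.length_pos_of_ne_nil hLne
    have hf2 : PySem.List.pyGetD L (-1) 0 = L.getLast hLne := PySem.List.pyGetD_neg_one L 0 hLne
    have hf1 : PySem.List.pyGetD L ((L.length : Int) - 1) 0 = L.getLast hLne := by
      rw [PySem.List.pyGetD_eq_getElem L 0 (by omega) (by omega)]
      rw [List.getLast_eq_getElem]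
      have ht : ((L.length : Int) - 1).toNat = L.length - 1 := by omega
      simp only [ht]
    rw [hf1, hf2]
    exact (loopB_eq_pairRes L hLne 0 (by decide)).symm
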